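-- pv_equiv track=rewrite | github.com/denisschmidt/leetcode | leetcode/recursion + memo/1745. Palindrome Partitioning IV/py/main.py | checkPartitioning_III
-- ===== SOURCE A (Python) =====
-- def checkPartitioning_III(s):
--     n = len(s)
--     target = 3
--     memo = {}
--     dpDpindrome = [[None] * n for _ in range(n)]
--
--     def dpindrome(left, right):
--         if left >= right:
--             return True
--
--         if dpDpindrome[left][right] != None:
--             return dpDpindrome[left][right]
--
--         if s[left] == s[right] and dpindrome(left + 1, right - 1):
--             dpDpindrome[left][right] = True
--             return True
--
--         dpDpindrome[left][right] = False
--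
--         return False
--
--     def dfs(index, cntPairs):
--         if index >= n:
--             return cntPairs == target
--
--         if cntPairs > target:
--             return False
--
--         if (index, cntPairs) in memo:
--             return memo[index, cntPairs]
--
--         for i in range(index, n):
--             if dpindrome(index, i):
--                 res = dfs(i + 1, cntPairs + 1)
--
--                 if res:
--                     memo[index, cntPairs] = True
--                     return True
--
--         memo[index, cntPairs] = False
--
--         return False
--
--     return dfs(0, 0)
-- ===== SOURCE B (Python) =====
-- def checkPartitioning_III(s):
--     n = len(s)
--     for i in range(1, n - 1):
--         for j in range(i + 1, n):
--             a, b, c = s[:i], s[i:j], s[j:]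
--             if a == a[::-1] and b == b[::-1] and c == c[::-1]:
--                 return True
--     return False
-- ===== Notes on version B (the rewrite author's own statement) =====
-- stated objective: simpler
-- what changed: Replaced the memoized recursive DFS over piece counts with a direct double loop over the two cut points, testing each of the three slices against its reversal.
import Mathlib
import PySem

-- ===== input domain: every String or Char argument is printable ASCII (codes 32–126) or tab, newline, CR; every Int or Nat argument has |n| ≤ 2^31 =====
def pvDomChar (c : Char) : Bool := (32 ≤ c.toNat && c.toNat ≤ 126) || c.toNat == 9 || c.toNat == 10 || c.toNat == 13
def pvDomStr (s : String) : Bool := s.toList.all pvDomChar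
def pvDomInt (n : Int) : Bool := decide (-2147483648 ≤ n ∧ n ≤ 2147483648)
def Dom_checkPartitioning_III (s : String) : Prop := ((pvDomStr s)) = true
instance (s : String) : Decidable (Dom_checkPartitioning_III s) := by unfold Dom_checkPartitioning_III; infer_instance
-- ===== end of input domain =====

-- B replaces A's memoized recursive DFS by a plain double loop over the two cut
-- points, checking each slice against its reversal (objective: simpler).
-- A's memo/dpDpindrome tables are pure caches of deterministic results; the port
-- keeps A's recursion and branch order but drops the caches, and uses a fuel
-- guard (fuel = n+1 always suffices) only to make the same recursion total.

-- ===== PORT A =====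
-- dpindrome(left, right)
def palA (cs : List Char) (l r : Nat) : Bool :=
  if r ≤ l then true
  else (cs.getD l ' ' == cs.getD r ' ') && palA cs (l + 1) (r - 1)
termination_by r - l
decreasing_by omega

mutual
-- dfs(index, cntPairs)
def dfsA (cs : List Char) (fuel idx cnt : Nat) : Bool :=
  match fuel with
  | 0 => false
  | f + 1 =>
    if cs.length ≤ idx then cnt == 3
    else if 3 < cnt then false
    else goA cs f idx cnt idx
termination_by (fuel, 0)
-- the 'for i in range(index, n)' loop inside dfs
def goA (cs : List Char) (fuel idx cnt i : Nat) : Bool :=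
  if cs.length ≤ i then false
  else if palA cs idx i && dfsA cs fuel (i + 1) (cnt + 1) then true
  else goA cs fuel idx cnt (i + 1)
termination_by (fuel, cs.length - i + 1)
decreasing_by all_goals simp_wf <;> omega
end

def checkPartitioning_III (s : String) : Bool :=
  dfsA s.toList (s.toList.length + 1) 0 0

-- ===== PORT B =====
def checkPartitioning_III_alt (s : String) : Bool :=
  let cs := s.toList
  let n := cs.length
  (List.range' 1 (n - 2)).any fun i =>
    (List.range' (i + 1) (n - (i + 1))).any fun j =>
      let a := cs.take i
      let b := (cs.drop i).take (j - i)
      let c := cs.drop j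
      (a == a.reverse) && (b == b.reverse) && (c == c.reverse)

-- ===== PRECONDITION & SPEC =====
def Spec_checkPartitioning_III (s : String) (out : Bool) : Prop := out = checkPartitioning_III_alt s
instance (s : String) (out : Bool) : Decidable (Spec_checkPartitioning_III s out) := by unfold Spec_checkPartitioning_III; infer_instance

-- ===== CLAIM (what is proved, stated in full; the proofs are below) =====
def Claim_equal_checkPartitioning_III : Prop := ∀ (s : String), Dom_checkPartitioning_III s → Spec_checkPartitioning_III s (checkPartitioning_III s)

-- ===== LEMMAS AND PROOFS =====

-- the substring s[l..r] (inclusive) as a list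
def Seg (cs : List Char) (l r : Nat) : List Char := (cs.drop l).take (r + 1 - l)

-- cs[l:] splits into exactly k nonempty palindromic segments
def SplitsK (cs : List Char) : Nat → Nat → Prop
  | 0, l => cs.length ≤ l
  | k + 1, l => ∃ i, l ≤ i ∧ i < cs.length ∧ Seg cs l i = (Seg cs l i).reverse ∧ SplitsK cs k (i + 1)

theorem Seg_decomp (cs : List Char) (l r : Nat) (hlr : l < r) (hr : r < cs.length) :
    Seg cs l r = cs.getD l ' ' :: (Seg cs (l + 1) (r - 1) ++ [cs.getD r ' ']) := by
  have hl : l < cs.length := by omega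
  unfold Seg
  rw [List.drop_eq_getElem_cons hl]
  have h1 : r + 1 - l = (r - l - 1) + 1 + 1 := by omega
  rw [h1, List.take_succ_cons, List.take_succ]
  have h2 : (cs.drop (l + 1))[r - l - 1]? = some cs[r] := by
    rw [List.getElem?_drop]
    have : l + 1 + (r - l - 1) = r := by omega
    rw [this, List.getElem?_eq_getElem hr]
  rw [h2]
  have h3 : r - 1 + 1 - (l + 1) = r - l - 1 := by omega
  simp [h3, List.getD_eq_getElem?_getD, List.getElem?_eq_getElem hl, List.getElem?_eq_getElem hr]

theorem pal_cons_append (c c' : Char) (m : List Char) :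
    (c :: (m ++ [c'])) = (c :: (m ++ [c'])).reverse ↔ (c = c' ∧ m = m.reverse) := by
  have hrev : (c :: (m ++ [c'])).reverse = c' :: (m.reverse ++ [c]) := by simp
  rw [hrev]
  constructor
  · intro h
    injection h with h1 h2
    subst h1
    refine ⟨rfl, ?_⟩
    have := congrArg List.dropLast h2
    simpa using this
  · rintro ⟨h1, h2⟩
    subst h1
    rw [← h2]

theorem palA_iff (cs : List Char) (l r : Nat) (hr : r < cs.length) :
    palA cs l r = true ↔ Seg cs l r = (Seg cs l r).reverse := by
  rw [palA]
  split
  · rename_i hle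
    rcases Nat.lt_or_ge r l with hlt | hge
    · have : r + 1 - l = 0 := by omega
      simp [Seg, this]
    · have hrl : r = l := by omega
      subst hrl
      have hl : r < cs.length := hr
      have hseg : Seg cs r r = [cs[r]] := by
        unfold Seg
        have h1 : r + 1 - r = 1 := by omega
        rw [h1, List.drop_eq_getElem_cons hl]
        simp only [List.take_succ_cons, List.take_zero]
      simp [hseg]
  · rename_i hgt
    have hlr : l < r := by omega
    rw [Seg_decomp cs l r hlr hr, pal_cons_append]
    have ih := palA_iff cs (l + 1) (r - 1) (by omega)
    simp only [Bool.and_eq_true, beq_iff_eq, ih]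
termination_by r - l
decreasing_by omega

theorem goA_iff (cs : List Char) (fuel idx cnt i : Nat) :
    goA cs fuel idx cnt i = true ↔
      ∃ j, i ≤ j ∧ j < cs.length ∧ palA cs idx j = true ∧ dfsA cs fuel (j + 1) (cnt + 1) = true := by
  rw [goA]
  split
  · rename_i h
    constructor
    · intro hc; exact absurd hc (by simp)
    · rintro ⟨j, hij, hjn, -, -⟩; omega
  · rename_i hi
    split
    · rename_i hcond
      simp only [Bool.and_eq_true] at hcond
      constructor
      · intro _; exact ⟨i, le_refl i, by omega, hcond.1, hcond.2⟩
      · intro _; rfl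
    · rename_i hcond
      rw [goA_iff cs fuel idx cnt (i + 1)]
      constructor
      · rintro ⟨j, hij, h⟩; exact ⟨j, by omega, h⟩
      · rintro ⟨j, hij, hjn, hp, hd⟩
        rcases Nat.eq_or_lt_of_le hij with heq | hlt
        · exfalso; apply hcond; rw [← heq] at hp hd; simp [hp, hd]
        · exact ⟨j, by omega, hjn, hp, hd⟩
termination_by cs.length - i
decreasing_by omega

theorem dfsA_iff (cs : List Char) (fuel : Nat) :
    ∀ l cnt, cs.length - l < fuel →
      (dfsA cs fuel l cnt = true ↔ (cnt ≤ 3 ∧ SplitsK cs (3 - cnt) l)) := by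
  induction fuel with
  | zero => intro l cnt h; omega
  | succ f ih =>
    intro l cnt hfuel
    rw [dfsA]
    split
    · rename_i hnl
      constructor
      · intro h
        have hc : cnt = 3 := by simpa using h
        subst hc
        exact ⟨by omega, hnl⟩
      · rintro ⟨hc3, hsp⟩
        rcases Nat.eq_or_lt_of_le hc3 with heq | hlt
        · simp [heq]
        · exfalso
          have hk : 3 - cnt = (3 - cnt - 1) + 1 := by omega
          rw [hk] at hsp
          obtain ⟨i, hli, hin, -, -⟩ := hsp
          omega
    · rename_i hln
      split
      · rename_i hc
        constructor
        · intro h; exact absurd h (by simp)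
        · rintro ⟨hc3, -⟩; omega
      · rename_i hc
        have hcnt : cnt ≤ 3 := by omega
        rw [goA_iff]
        constructor
        · rintro ⟨j, hlj, hjn, hp, hd⟩
          have hd' := (ih (j + 1) (cnt + 1) (by omega)).mp hd
          have hcc : cnt < 3 := by omega
          refine ⟨hcnt, ?_⟩
          have hk : 3 - cnt = (3 - (cnt + 1)) + 1 := by omega
          rw [hk]
          exact ⟨j, hlj, hjn, (palA_iff cs l j hjn).mp hp, hd'.2⟩
        · rintro ⟨-, hsp⟩
          by_cases hcc : cnt = 3
          · exfalso
            subst hcc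
            simp only [SplitsK] at hsp
            omega
          · have hk : 3 - cnt = (3 - (cnt + 1)) + 1 := by omega
            rw [hk] at hsp
            obtain ⟨j, hlj, hjn, hp, hsp'⟩ := hsp
            refine ⟨j, hlj, hjn, (palA_iff cs l j hjn).mpr hp, ?_⟩
            exact (ih (j + 1) (cnt + 1) (by omega)).mpr ⟨by omega, hsp'⟩

theorem alt_iff (s : String) :
    checkPartitioning_III_alt s = true ↔
      ∃ i j, 1 ≤ i ∧ i < s.toList.length - 1 ∧ i + 1 ≤ j ∧ j < s.toList.length ∧
        s.toList.take i = (s.toList.take i).reverse ∧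
        (s.toList.drop i).take (j - i) = ((s.toList.drop i).take (j - i)).reverse ∧
        s.toList.drop j = (s.toList.drop j).reverse := by
  unfold checkPartitioning_III_alt
  simp only [List.any_eq_true, List.mem_range'_1, Bool.and_eq_true, beq_iff_eq]
  constructor
  · rintro ⟨i, ⟨hi1, hi2⟩, j, ⟨hj1, hj2⟩, ⟨ha, hb⟩, hc⟩
    exact ⟨i, j, hi1, by omega, hj1, by omega, ha, hb, hc⟩
  · rintro ⟨i, j, hi1, hi2, hj1, hj2, ha, hb, hc⟩
    exact ⟨i, ⟨hi1, by omega⟩, j, ⟨hj1, by omega⟩, ⟨ha, hb⟩, hc⟩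

theorem splits3_iff (cs : List Char) :
    SplitsK cs 3 0 ↔
      ∃ i j, 1 ≤ i ∧ i < cs.length - 1 ∧ i + 1 ≤ j ∧ j < cs.length ∧
        cs.take i = (cs.take i).reverse ∧
        (cs.drop i).take (j - i) = ((cs.drop i).take (j - i)).reverse ∧
        cs.drop j = (cs.drop j).reverse := by
  constructor
  · rintro ⟨a, -, han, hpa, b, hab, hbn, hpb, c, hbc, hcn, hpc, hend⟩
    simp only [SplitsK] at hend
    have hceq : c = cs.length - 1 := by omega
    refine ⟨a + 1, b + 1, by omega, by omega, by omega, by omega, ?_, ?_, ?_⟩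
    · have : Seg cs 0 a = cs.take (a + 1) := by simp [Seg]
      rwa [this] at hpa
    · have : Seg cs (a + 1) b = (cs.drop (a + 1)).take (b + 1 - (a + 1)) := by
        simp [Seg]
      rwa [this] at hpb
    · have : Seg cs (b + 1) c = cs.drop (b + 1) := by
        unfold Seg
        apply List.take_of_length_le
        simp only [List.length_drop]
        omega
      rwa [this] at hpc
  · rintro ⟨i, j, hi1, hi2, hj1, hj2, ha, hb, hc⟩
    refine ⟨i - 1, by omega, by omega, ?_, j - 1, by omega, by omega, ?_, cs.length - 1,
      by omega, by omega, ?_, by simp [SplitsK]; omega⟩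
    · have : Seg cs 0 (i - 1) = cs.take i := by
        simp [Seg]; congr 1; omega
      rwa [this]
    · have : Seg cs (i - 1 + 1) (j - 1) = (cs.drop i).take (j - i) := by
        have h1 : i - 1 + 1 = i := by omega
        have h2 : j - 1 + 1 - i = j - i := by omega
        simp [Seg, h1, h2]
      rwa [this]
    · have h1 : j - 1 + 1 = j := by omega
      have : Seg cs (j - 1 + 1) (cs.length - 1) = cs.drop j := by
        unfold Seg
        rw [h1]
        apply List.take_of_length_le
        simp only [List.length_drop]
        omega
      rwa [this]

-- ===== VERDICT (by name: the statement is the Claim_ definition above) =====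
theorem checkPartitioning_III_spec : Claim_equal_checkPartitioning_III := by
  intro s _
  unfold Spec_checkPartitioning_III checkPartitioning_III
  have hA := dfsA_iff s.toList (s.toList.length + 1) 0 0 (by omega)
  have h30 : 3 - 0 = 3 := rfl
  rw [h30] at hA
  have hB := alt_iff s
  have hS := splits3_iff s.toList
  cases hb : checkPartitioning_III_alt s
  · cases hd : dfsA s.toList (s.toList.length + 1) 0 0
    · rfl
    · exfalso
      have := (hA.mp hd).2
      have := hS.mp this
      have := hB.mpr this
      rw [hb] at this; exact Bool.false_ne_true this
  · exact hA.mpr ⟨by omega, hS.mpr (hB.mp hb)⟩
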